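-- pv_equiv track=rewrite | github.com/MachineLearningMike/Aspect_Opinion_Analysis_NLP | W2VEC.py | __OneToManyMappingFromFirst__
-- ===== SOURCE A (Python) =====
-- def __OneToManyMappingFromFirst__(token, candSubstrings):
--
--     mapping = [];
--
--     token = token.lower()
--     token = ''.join ( c for c in token if c.isalpha() ) # not isalnum()
--
--     concat = ''
--     for candId in range(len(candSubstrings)):
--
--         substring = candSubstrings[candId]
--         substring = ''.join ( c for c in substring if c.isalpha() ) # not isalnum()
--
--         concat += substring
--
--         if token == concat :
--             for id in range(candId + 1) :
--                 mapping.append(id)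
--             break
--
--     return mapping
-- ===== SOURCE B (Python) =====
-- def __OneToManyMappingFromFirst__(token, candSubstrings):
--     # Staged algorithm: clean everything up front, join ALL cleaned substrings
--     # once, test whether that full join starts with the cleaned token, and then
--     # just scan cumulative lengths for the first index where the running total
--     # equals len(target).  Staged passes instead of A's grow-and-compare loop.
--     target = ''.join(c for c in token.lower() if c.isalpha())
--     cleaned = [''.join(c for c in s if c.isalpha()) for s in candSubstrings]
--     full = ''.join(cleaned)
--     if not full.startswith(target):
--         return []
--     need = len(target)
--     total = 0
--     for k, s in enumerate(cleaned):
--         total += len(s)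
--         if total == need:
--             return list(range(k + 1))
--     return []
-- ===== Notes on version B (the rewrite author's own statement) =====
-- stated objective: alternative
-- what changed: B replaces A's growing concat string (extended and compared against the token each iteration) with a staged algorithm: clean and join all substrings once, a single startswith test against the cleaned token, then a cumulative-length scan for the first index where the running total equals len(target).
import Mathlib
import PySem

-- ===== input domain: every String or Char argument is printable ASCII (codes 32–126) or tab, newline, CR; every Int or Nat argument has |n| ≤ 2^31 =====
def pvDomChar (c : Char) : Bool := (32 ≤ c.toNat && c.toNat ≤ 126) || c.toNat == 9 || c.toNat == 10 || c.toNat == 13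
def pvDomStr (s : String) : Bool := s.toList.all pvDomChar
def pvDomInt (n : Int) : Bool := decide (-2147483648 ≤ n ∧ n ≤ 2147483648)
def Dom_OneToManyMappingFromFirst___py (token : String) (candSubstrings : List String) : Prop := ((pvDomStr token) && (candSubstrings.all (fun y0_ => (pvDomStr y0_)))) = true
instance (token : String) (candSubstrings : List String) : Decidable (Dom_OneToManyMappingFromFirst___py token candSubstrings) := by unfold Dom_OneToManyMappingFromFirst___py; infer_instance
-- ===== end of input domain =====

-- B replaces A's growing concat-and-compare loop by a staged algorithm: join all
-- cleaned substrings once, one prefix test, then a cumulative-length scan.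

-- ===== PORT A =====
-- A's loop: concat grows; on full equality emit range(candId+1) and break
def pvLoopA (token : List Char) (candSubstrings : List String) (candId : Nat)
    (concat : List Char) : List Int :=
  match candSubstrings with
  | [] => []
  | s :: rest =>
      let substring := s.toList.filter PySem.Chars.isalpha
      let concat := concat ++ substring
      if token = concat then (List.range (candId + 1)).map Int.ofNat
      else pvLoopA token rest (candId + 1) concat

def OneToManyMappingFromFirst___py (token : String) (candSubstrings : List String) : List Int :=
  let token := (PySem.Str.lower token).toList.filter PySem.Chars.isalpha
  pvLoopA token candSubstrings 0 []

-- ===== PORT B =====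
-- B's scan: running total of cleaned lengths; first k with total == need wins
def pvCumScan (cleaned : List (List Char)) (k : Nat) (need : Nat) (total : Nat) : List Int :=
  match cleaned with
  | [] => []
  | s :: rest =>
      let total := total + s.length
      if total = need then (List.range (k + 1)).map Int.ofNat
      else pvCumScan rest (k + 1) need total

def OneToManyMappingFromFirst___py_alt (token : String) (candSubstrings : List String) : List Int :=
  let target := (PySem.Str.lower token).toList.filter PySem.Chars.isalpha
  let cleaned := candSubstrings.map (fun s => s.toList.filter PySem.Chars.isalpha)
  let full := cleaned.flatten
  -- 'target.isPrefixOf full' is Python's full.startswith(target)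
  if target.isPrefixOf full then pvCumScan cleaned 0 target.length 0
  else []

-- ===== PRECONDITION & SPEC =====
def Spec_OneToManyMappingFromFirst___py (token : String) (candSubstrings : List String) (out : List Int) : Prop := out = OneToManyMappingFromFirst___py_alt token candSubstrings
instance (token : String) (candSubstrings : List String) (out : List Int) : Decidable (Spec_OneToManyMappingFromFirst___py token candSubstrings out) := by unfold Spec_OneToManyMappingFromFirst___py; infer_instance

-- ===== CLAIM (what is proved, stated in full; the proofs are below) =====
def Claim_equal_OneToManyMappingFromFirst___py : Prop := ∀ (token : String) (candSubstrings : List String), Dom_OneToManyMappingFromFirst___py token candSubstrings → Spec_OneToManyMappingFromFirst___py token candSubstrings (OneToManyMappingFromFirst___py token candSubstrings)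

-- ===== LEMMAS AND PROOFS =====

-- if the target is not a prefix of concat ++ (everything still to come), no
-- later concat can ever equal it: A's loop returns []
theorem pvLoopA_dead (target : List Char) (subs : List String) :
    ∀ candId concat,
      ¬ target <+: concat ++ (subs.map (fun s => s.toList.filter PySem.Chars.isalpha)).flatten →
      pvLoopA target subs candId concat = [] := by
  induction subs with
  | nil => intro candId concat _; rfl
  | cons s rest ih =>
      intro candId concat h
      simp only [pvLoopA]
      set sub := s.toList.filter PySem.Chars.isalpha with hsub
      have hne : target ≠ concat ++ sub := by
        intro he
        exact h ⟨(List.map (fun s => s.toList.filter PySem.Chars.isalpha) rest).flatten,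
          by simp [he, List.append_assoc, hsub]⟩
      rw [if_neg hne]
      apply ih
      intro hp
      exact h (by simpa [List.append_assoc] using hp)

-- when the target IS a prefix of concat ++ flatten(rest of cleaned), equality
-- with a future concat is exactly a length condition, so A's loop computes B's
-- cumulative-length scan
theorem pv_sync (target : List Char) (subs : List String) :
    ∀ candId concat,
      target <+: concat ++ (subs.map (fun s => s.toList.filter PySem.Chars.isalpha)).flatten →
      pvLoopA target subs candId concat =
        pvCumScan (subs.map (fun s => s.toList.filter PySem.Chars.isalpha)) candId target.length concat.length := by
  induction subs with
  | nil => intro candId concat _; rfl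
  | cons s rest ih =>
      intro candId concat hpre
      simp only [pvLoopA, List.map_cons, pvCumScan]
      set sub := s.toList.filter PySem.Chars.isalpha with hsub
      have hflat : concat ++ (List.map (fun s => s.toList.filter PySem.Chars.isalpha) (s :: rest)).flatten
          = (concat ++ sub) ++ (List.map (fun s => s.toList.filter PySem.Chars.isalpha) rest).flatten := by
        simp [List.append_assoc, hsub]
      rw [hflat] at hpre
      by_cases hlen : concat.length + sub.length = target.length
      · have heq : target = concat ++ sub := by
          have h1 := List.prefix_iff_eq_take.mp hpre
          have h2 : ((concat ++ sub) ++ (List.map (fun s => s.toList.filter PySem.Chars.isalpha) rest).flatten).take target.length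
              = concat ++ sub := by
            rw [List.take_append_of_le_length (by simp; omega)]
            rw [List.take_of_length_le (by simp; omega)]
          rw [h1, h2]
        rw [if_pos heq, if_pos hlen]
      · have hne : target ≠ concat ++ sub := by
          intro he; apply hlen; rw [he]; simp
        rw [if_neg hne, if_neg hlen]
        have := ih (candId + 1) (concat ++ sub) hpre
        simpa using this

-- ===== VERDICT (by name: the statement is the Claim_ definition above) =====
theorem OneToManyMappingFromFirst___py_spec : Claim_equal_OneToManyMappingFromFirst___py := by
  intro token candSubstrings _
  unfold Spec_OneToManyMappingFromFirst___py
  unfold OneToManyMappingFromFirst___py OneToManyMappingFromFirst___py_alt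
  set target := (PySem.Str.lower token).toList.filter PySem.Chars.isalpha with htarget
  set cleaned := candSubstrings.map (fun s => s.toList.filter PySem.Chars.isalpha) with hcleaned
  by_cases hp : target <+: cleaned.flatten
  · rw [if_pos (List.isPrefixOf_iff_prefix.mpr hp)]
    have := pv_sync target candSubstrings 0 [] (by simpa [hcleaned] using hp)
    simpa [hcleaned] using this
  · rw [if_neg (fun hb => hp (List.isPrefixOf_iff_prefix.mp hb))]
    exact pvLoopA_dead target candSubstrings 0 [] (by simpa [hcleaned] using hp)
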